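-- pv_equiv track=rewrite | github.com/eReuse/devicehub-teal | ereuse_devicehub/ereuse_utils/getter.py | indents
-- ===== SOURCE A (Python) =====
-- from typing import Any, Iterable, Set, Type, Union
--
-- def indents(iterable: Iterable[str], keyword: str, indent='  '):
--     """For a given iterable of strings, returns blocks of the same
--     left indentation.
--
--     For example:
--     foo1
--       bar1
--       bar2
--     foo2
--       foo2
--
--     For that text, this method would return ``[bar1, bar2]`` for passed-in
--     keyword ``foo1``.
--
--     :param iterable: A list of strings representing lines.
--     :param keyword: The title preceding the indentation.
--     :param indent: Which characters makes the indentation.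
--     """
--     section_pos = None
--     for i, line in enumerate(iterable):
--         if not line.startswith(indent):
--             if keyword in line:
--                 section_pos = i
--             elif section_pos is not None:
--                 yield iterable[section_pos:i]
--                 section_pos = None
--     return
-- ===== SOURCE B (Python) =====
-- def indents(iterable, keyword, indent='  '):
--     """Single pass with a running buffer instead of index tracking + slicing."""
--     block = None
--     for line in iterable:
--         if line.startswith(indent):
--             if block is not None:
--                 block.append(line)
--         elif keyword in line:
--             block = [line]
--         elif block is not None:
--             yield block
--             block = None
-- ===== Notes on version B (the rewrite author's own statement) =====
-- stated objective: alternative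
-- what changed: Replaces enumerate-with-saved-start-index and slicing of the whole list by a single pass that maintains a running buffer (None or the current block) and yields it when the block ends.
import Mathlib
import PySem

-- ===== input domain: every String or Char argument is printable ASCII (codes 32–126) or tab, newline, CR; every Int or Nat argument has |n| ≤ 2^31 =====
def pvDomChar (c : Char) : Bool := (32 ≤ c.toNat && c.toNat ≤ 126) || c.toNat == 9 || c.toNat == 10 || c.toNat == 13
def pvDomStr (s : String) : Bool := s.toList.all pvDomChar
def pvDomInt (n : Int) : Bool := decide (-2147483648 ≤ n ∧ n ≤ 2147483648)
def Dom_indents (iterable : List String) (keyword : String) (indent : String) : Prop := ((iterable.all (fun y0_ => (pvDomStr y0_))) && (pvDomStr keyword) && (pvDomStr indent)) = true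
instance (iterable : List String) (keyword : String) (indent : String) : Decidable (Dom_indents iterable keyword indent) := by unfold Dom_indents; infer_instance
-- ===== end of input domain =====

-- B replaces A's saved-start-index-plus-slice scheme with a single pass keeping a
-- running buffer of the current block (objective: alternative decomposition).

-- ===== PORT A =====
-- A's 'for i, line in enumerate(iterable)' loop: recursion over the remaining lines
-- carrying the index i and section_pos; a yield appends to the accumulator out.
def indentsLoopA (iterable : List String) (keyword : String) (indent : String) :
    List String → Nat → Option Nat → List (List String) → List (List String)
  | [], _, _, out => out
  | line :: rest, i, sectionPos, out =>
    if ¬ PySem.Str.startswith line indent then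
      if PySem.Str.isIn keyword line then
        indentsLoopA iterable keyword indent rest (i + 1) (some i) out
      else
        match sectionPos with
        | some p =>
            indentsLoopA iterable keyword indent rest (i + 1) none
              (out ++ [PySem.List.slice iterable (some (p : Int)) (some (i : Int))])
        | none => indentsLoopA iterable keyword indent rest (i + 1) none out
    else
      indentsLoopA iterable keyword indent rest (i + 1) sectionPos out

def indents (iterable : List String) (keyword : String) (indent : String) : List (List String) :=
  indentsLoopA iterable keyword indent iterable 0 none []

-- ===== PORT B =====
-- B's loop: a running buffer 'block' (Option (List String)); appending lines to it,
-- yielding it (appending to out) when a non-indented, non-keyword line is met.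
def indentsLoopB (keyword : String) (indent : String) :
    List String → Option (List String) → List (List String) → List (List String)
  | [], _, out => out
  | line :: rest, block, out =>
    if PySem.Str.startswith line indent then
      indentsLoopB keyword indent rest (block.map (fun b => b ++ [line])) out
    else if PySem.Str.isIn keyword line then
      indentsLoopB keyword indent rest (some [line]) out
    else
      match block with
      | some b => indentsLoopB keyword indent rest none (out ++ [b])
      | none => indentsLoopB keyword indent rest none out

def indents_alt (iterable : List String) (keyword : String) (indent : String) : List (List String) :=
  indentsLoopB keyword indent iterable none []

-- ===== PRECONDITION & SPEC =====
def Spec_indents (iterable : List String) (keyword : String) (indent : String) (out : List (List String)) : Prop := out = indents_alt iterable keyword indent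
instance (iterable : List String) (keyword : String) (indent : String) (out : List (List String)) : Decidable (Spec_indents iterable keyword indent out) := by unfold Spec_indents; infer_instance

-- ===== CLAIM (what is proved, stated in full; the proofs are below) =====
def Claim_equal_indents : Prop := ∀ (iterable : List String) (keyword : String) (indent : String), Dom_indents iterable keyword indent → Spec_indents iterable keyword indent (indents iterable keyword indent)

-- ===== LEMMAS AND PROOFS =====

-- slice iterable p i, for p ≤ i ≤ length and rest = drop i, in drop/take form
lemma slice_eq (xs : List String) (p i : Nat) :
    PySem.List.slice xs (some (p : Int)) (some (i : Int)) = (xs.drop p).take (i - p) :=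
  PySem.List.slice_natCast xs p i

-- extending the current block by one more line
lemma take_succ_of_drop (xs : List String) (p i : Nat) (hp : p ≤ i)
    (line : String) (rest : List String) (h : xs.drop i = line :: rest) :
    (xs.drop p).take (i + 1 - p) = (xs.drop p).take (i - p) ++ [line] := by
  have hi : i < xs.length := by
    by_contra hlen
    simp [List.drop_eq_nil_of_le (le_of_not_gt (by omega))] at h
  have hx : xs[i]? = some line := by
    have h0 : (xs.drop i)[0]? = some line := by simp [h]
    rwa [List.getElem?_drop, Nat.add_zero] at h0
  have hget : (xs.drop p)[i - p]? = some line := by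
    rw [List.getElem?_drop]
    have hpi : p + (i - p) = i := by omega
    rw [hpi, hx]
  have hs : i + 1 - p = (i - p) + 1 := by omega
  rw [hs, List.take_add_one, hget]
  rfl

-- main invariant: A's loop with section_pos = p equals B's loop with
-- block = the slice collected so far
lemma loop_eq (iterable : List String) (keyword indent : String) :
    ∀ (rest : List String) (i : Nat) (pos : Option Nat) (out : List (List String)),
      iterable.drop i = rest →
      (∀ p, pos = some p → p ≤ i) →
      indentsLoopA iterable keyword indent rest i pos out =
        indentsLoopB keyword indent rest
          (pos.map (fun p => (iterable.drop p).take (i - p))) out := by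
  intro rest
  induction rest with
  | nil => intro i pos out _ _; cases pos <;> rfl
  | cons line rest ih =>
    intro i pos out hdrop hpos
    have hdrop' : iterable.drop (i + 1) = rest := by
      rw [← List.tail_drop, hdrop]; rfl
    rw [indentsLoopA.eq_def, indentsLoopB.eq_def]
    simp only []
    by_cases hsw : PySem.Str.startswith line indent = true
    · -- indented line: A keeps pos, B appends to the buffer (if any)
      rw [if_neg (by simp [PySem.Str.startswith] at hsw ⊢; simp [hsw]), if_pos hsw]
      rw [ih (i + 1) pos out hdrop' (fun p hp => Nat.le_succ_of_le (hpos p hp))]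
      congr 1
      cases pos with
      | none => rfl
      | some p =>
          have hp := hpos p rfl
          simp [take_succ_of_drop iterable p i hp line rest hdrop]
    · rw [if_pos hsw, if_neg hsw]
      by_cases hkw : PySem.Str.isIn keyword line = true
      · -- keyword line: A records i, B starts the fresh block [line]
        rw [if_pos hkw, if_pos hkw]
        rw [ih (i + 1) (some i) out hdrop' (by intro p hp; cases hp; omega)]
        congr 1
        simp [hdrop]
      · -- terminating line: both yield (or not)
        rw [if_neg hkw, if_neg hkw]
        cases pos with
        | none =>
            exact ih (i + 1) none out hdrop' (by intro p hp; cases hp)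
        | some p =>
            have hp := hpos p rfl
            simp only [Option.map_some]
            rw [ih (i + 1) none (out ++ [PySem.List.slice iterable (some (p : Int)) (some (i : Int))]) hdrop' (by intro q hq; cases hq)]
            simp [slice_eq iterable p i]

-- ===== VERDICT (by name: the statement is the Claim_ definition above) =====
theorem indents_spec : Claim_equal_indents := by
  intro iterable keyword indent _
  unfold Spec_indents indents indents_alt
  exact loop_eq iterable keyword indent iterable 0 none [] (by simp) (by intro p hp; cases hp)
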